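-- pv_equiv track=rewrite | github.com/sookops/data_structures_in_python | sources/01장/ch1-11.py | program_C
-- ===== SOURCE A (Python) =====
-- def program_C(n):	    # 프로그램 C
--     countC = 0
--     for i in range(n):
--         j = n
--         while j >= 1:
--             countC += 1
--             j //= 2
--     return countC
-- ===== SOURCE B (Python) =====
-- def program_C(n):
--     # closed form: the inner while runs bit_length(n) times, the outer loop n times
--     return n * n.bit_length() if n > 0 else 0
-- ===== Notes on version B (the rewrite author's own statement) =====
-- stated objective: faster
-- what changed: Replaced the O(n log n) nested counting loops by the closed form n * n.bit_length() (0 for n <= 0).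
import Mathlib
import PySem

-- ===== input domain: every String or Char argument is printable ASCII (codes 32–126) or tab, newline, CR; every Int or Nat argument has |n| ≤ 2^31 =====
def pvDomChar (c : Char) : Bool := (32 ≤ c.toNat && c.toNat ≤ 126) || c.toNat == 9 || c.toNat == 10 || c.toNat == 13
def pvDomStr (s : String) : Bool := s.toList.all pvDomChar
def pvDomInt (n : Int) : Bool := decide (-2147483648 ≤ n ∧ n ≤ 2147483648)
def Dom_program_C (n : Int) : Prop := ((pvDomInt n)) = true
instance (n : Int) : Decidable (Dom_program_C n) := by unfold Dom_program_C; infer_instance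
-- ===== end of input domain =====

-- B replaces the nested counting loops by the closed form n * bit_length(n); faster (asymptotic).


-- ===== PORT A =====
-- inner 'while j >= 1: countC += 1; j //= 2'
def pvInnerC (j c : Int) : Int :=
  if h : 1 ≤ j then pvInnerC (PySem.Int.floordiv j 2) (c + 1) else c
termination_by j.toNat
decreasing_by
  rw [PySem.Int.floordiv_eq_ediv_of_pos (by omega)]
  omega

def program_C (n : Int) : Int :=
  (PySem.List.pyRange 0 n 1).foldl (fun countC _i => pvInnerC n countC) 0

-- ===== PORT B =====
def program_C_alt (n : Int) : Int :=
  if 0 < n then n * (PySem.Int.bitLength n : Int) else 0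

-- ===== PRECONDITION & SPEC =====
def Spec_program_C (n : Int) (out : Int) : Prop := out = program_C_alt n
instance (n : Int) (out : Int) : Decidable (Spec_program_C n out) := by unfold Spec_program_C; infer_instance

-- ===== CLAIM (what is proved, stated in full; the proofs are below) =====
def Claim_equal_program_C : Prop := ∀ (n : Int), Dom_program_C n → Spec_program_C n (program_C n)

-- ===== LEMMAS AND PROOFS =====

theorem pvHalf_nonneg (j : Int) (h : 0 ≤ j) : 0 ≤ PySem.Int.floordiv j 2 := by
  rw [PySem.Int.floordiv_eq_ediv_of_pos (by norm_num)]; omega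

theorem pvInnerC_eq (j c : Int) :
    0 ≤ j → pvInnerC j c = c + (PySem.Int.bitLength j : Int) := by
  induction j, c using pvInnerC.induct with
  | case1 j c h ih =>
      intro _
      rw [pvInnerC, dif_pos h, ih (pvHalf_nonneg j (by omega))]
      have hb := PySem.Int.bitLength_of_pos (n := j) (by omega)
      rw [hb]
      push_cast
      ring
  | case2 j c h =>
      intro hj
      rw [pvInnerC, dif_neg h]
      have hz : j = 0 := by omega
      simp [hz, PySem.Int.bitLength_zero]

-- ===== VERDICT (by name: the statement is the Claim_ definition above) =====
theorem program_C_spec : Claim_equal_program_C := by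
  intro n _
  unfold Spec_program_C program_C program_C_alt
  by_cases hn : 0 < n
  · rw [if_pos hn]
    have hbody : ∀ c : Int, pvInnerC n c = c + (PySem.Int.bitLength n : Int) :=
      fun c => pvInnerC_eq n c (by omega)
    calc (PySem.List.pyRange 0 n 1).foldl (fun countC _i => pvInnerC n countC) 0
        = (PySem.List.pyRange 0 n 1).foldl
            (fun countC _i => countC + (PySem.Int.bitLength n : Int)) 0 :=
          PySem.List.foldl_congr_mem _ _ _ _ (fun acc x _ => hbody acc)
      _ = 0 + ((PySem.List.pyRange 0 n 1).map
            (fun _ => (PySem.Int.bitLength n : Int))).sum :=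
          PySem.List.foldl_add _ _ _
      _ = n * (PySem.Int.bitLength n : Int) := by
          rw [List.map_const', PySem.List.length_pyRange_one, List.sum_replicate,
            nsmul_eq_mul]
          have h' : (((n - 0).toNat : Int)) = n := by omega
          rw [h']
          ring
  · rw [PySem.List.pyRange_one_eq_nil (by omega), if_neg hn]
    rfl
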